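-- pv_equiv track=rewrite | github.com/amantayal44/3b1b_agent | helpers.py | indent_python_code
-- ===== SOURCE A (Python) =====
-- def remove_python(text):
--     text = text.replace("```python", "")
--     text = text.replace("```", "")
--     return text
--
-- def indent_python_code(code, scene_ids=[]):
--     code = remove_python(code)
--     code_lines = code.split("\n")
--
--     def remove_trailing_empty_lines(lines):
--         while lines and not lines[-1].strip():
--             lines.pop(-1)
--
--     required_method_names = ["play_scene_{}".format(scene_id) for scene_id in scene_ids]
--
--     def check_required_method(method_name):
--         if not method_name.strip().startswith("def play_scene_"):
--             return False
--         return any(name in method_name for name in required_method_names)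
--
--     methods = []
--     curr_method = []
--     for line in code_lines:
--         if line.strip().startswith("def play_scene_"):
--             remove_trailing_empty_lines(curr_method)
--             if curr_method and check_required_method(curr_method[0]):
--                 methods.append("\n".join(curr_method))
--             curr_method = []
--         curr_method.append(line.rstrip())
--
--     remove_trailing_empty_lines(curr_method)
--     if curr_method and check_required_method(curr_method[0]):
--         methods.append("\n".join(curr_method))
--
--     return "\n\n" + "\n\n".join(methods)
-- ===== SOURCE B (Python) =====
-- def indent_python_code(code, scene_ids=[]):
--     code = code.replace("```python", "").replace("```", "")
--     lines = code.split("\n")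
--     names = ["play_scene_" + str(sid) for sid in scene_ids]
--
--     def is_header(line):
--         return line.strip().startswith("def play_scene_")
--
--     n = len(lines)
--     i = 0
--     while i < n and not is_header(lines[i]):  # discard the preamble
--         i += 1
--     out = []
--     while i < n:
--         j = i + 1
--         while j < n and not is_header(lines[j]):  # find the next header
--             j += 1
--         body = [l.rstrip() for l in lines[i:j]]
--         while body and not body[-1].strip():
--             body.pop()
--         if any(name in body[0] for name in names):
--             out.append("\n".join(body))
--         i = j
--     return "\n\n" + "\n\n".join(out)
-- ===== Notes on version B (the rewrite author's own statement) =====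
-- stated objective: alternative
-- what changed: Replaces A's accumulator-with-duplicated-flush single pass by a boundary-driven two-pointer segmentation: skip the preamble, then repeatedly slice the segment from one header line to the next, trim and test it; the redundant startswith re-check on a known header line is dropped.
import Mathlib
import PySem

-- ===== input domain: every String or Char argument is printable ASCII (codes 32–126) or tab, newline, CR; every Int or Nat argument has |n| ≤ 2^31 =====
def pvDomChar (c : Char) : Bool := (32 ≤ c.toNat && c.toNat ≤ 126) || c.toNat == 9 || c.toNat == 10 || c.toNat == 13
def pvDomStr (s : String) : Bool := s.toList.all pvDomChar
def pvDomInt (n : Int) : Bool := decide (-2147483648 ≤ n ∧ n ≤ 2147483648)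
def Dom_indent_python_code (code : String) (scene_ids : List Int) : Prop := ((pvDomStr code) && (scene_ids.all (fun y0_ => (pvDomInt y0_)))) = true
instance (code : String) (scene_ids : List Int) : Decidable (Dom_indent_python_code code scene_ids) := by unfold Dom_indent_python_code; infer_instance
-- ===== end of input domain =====

-- B replaces A's accumulator-with-duplicated-flush pass by a boundary-driven two-pointer
-- segmentation (skip the preamble, then slice header-to-header segments); same results, same cost.

-- ===== PORT A =====
def pvRemovePython (text : String) : String :=
  PySem.Str.replace (PySem.Str.replace text "```python" "") "```" ""

def pvIsHeader (line : String) : Bool :=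
  PySem.Str.startswith (PySem.Str.strip line) "def play_scene_"

-- A's `remove_trailing_empty_lines` (while lines and not lines[-1].strip(): lines.pop(-1));
-- the identical two-line loop also appears verbatim in B, so both ports share it.
def pvRTEL (ls : List String) : List String :=
  if h : ls = [] then []
  else if PySem.Str.strip (ls.getLast h) == "" then pvRTEL ls.dropLast else ls
termination_by ls.length
decreasing_by
  have hlen : ls.length ≠ 0 := fun hh => h (List.eq_nil_of_length_eq_zero hh)
  simp [List.length_dropLast]; omega

def pvCheckA (names : List String) (method_name : String) : Bool :=
  if !pvIsHeader method_name then false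
  else names.any (fun name => PySem.Str.isIn name method_name)

-- the flush performed before each header and once after the loop
def pvFlushA (names : List String) (ms : List String) (c : List String) : List String :=
  match pvRTEL c with
  | [] => ms
  | h :: t => if pvCheckA names h then ms ++ [PySem.Str.join "\n" (h :: t)] else ms

def pvStepA (names : List String) (st : List String × List String) (line : String) :
    List String × List String :=
  if pvIsHeader line then (pvFlushA names st.1 st.2, [PySem.Str.rstrip line])
  else (st.1, st.2 ++ [PySem.Str.rstrip line])

def indent_python_code (code : String) (scene_ids : List Int) : String :=
  let code := pvRemovePython code
  let code_lines := (PySem.Str.split? code "\n").getD []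
  let names := scene_ids.map (fun sid => "play_scene_" ++ PySem.Int.toStr sid)
  let st := code_lines.foldl (pvStepA names) ([], [])
  let methods := pvFlushA names st.1 st.2
  "\n\n" ++ PySem.Str.join "\n\n" methods

-- ===== PORT B =====
-- B's outer while loop: each iteration takes the segment from one header line up to the next
def pvBlocksB (names : List String) : List String → List String
  | [] => []
  | h :: rest =>
    let body := pvRTEL ((h :: rest.takeWhile (fun l => !pvIsHeader l)).map PySem.Str.rstrip)
    (if names.any (fun name => PySem.Str.isIn name (body.headD "")) then
       [PySem.Str.join "\n" body] else [])
      ++ pvBlocksB names (rest.dropWhile (fun l => !pvIsHeader l))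
termination_by ls => ls.length
decreasing_by
  simp only [List.length_cons]
  exact Nat.lt_succ_of_le (List.length_dropWhile_le _ _)

def indent_python_code_alt (code : String) (scene_ids : List Int) : String :=
  let code_lines :=
    (PySem.Str.split? (PySem.Str.replace (PySem.Str.replace code "```python" "") "```" "") "\n").getD []
  let names := scene_ids.map (fun sid => "play_scene_" ++ PySem.Int.toStr sid)
  "\n\n" ++ PySem.Str.join "\n\n"
    (pvBlocksB names (code_lines.dropWhile (fun l => !pvIsHeader l)))

-- ===== PRECONDITION & SPEC =====
def Spec_indent_python_code (code : String) (scene_ids : List Int) (out : String) : Prop := out = indent_python_code_alt code scene_ids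
instance (code : String) (scene_ids : List Int) (out : String) : Decidable (Spec_indent_python_code code scene_ids out) := by unfold Spec_indent_python_code; infer_instance

-- ===== CLAIM (what is proved, stated in full; the proofs are below) =====
def Claim_equal_indent_python_code : Prop := ∀ (code : String) (scene_ids : List Int), Dom_indent_python_code code scene_ids → Spec_indent_python_code code scene_ids (indent_python_code code scene_ids)

-- ===== LEMMAS AND PROOFS =====

theorem pvDropWhileIdem {α : Type} (p : α → Bool) (l : List α) :
    (l.dropWhile p).dropWhile p = l.dropWhile p := by
  induction l with
  | nil => simp
  | cons a t ih =>
    by_cases h : p a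
    · simp [List.dropWhile_cons, h, ih]
    · simp [List.dropWhile_cons, h]

theorem pvRstripRstrip (cs : List Char) :
    PySem.Chars.rstrip (PySem.Chars.rstrip cs) = PySem.Chars.rstrip cs := by
  simp [PySem.Chars.rstrip, pvDropWhileIdem]

theorem pvLstripRstripComm (cs : List Char) :
    PySem.Chars.lstrip (PySem.Chars.rstrip cs) = PySem.Chars.rstrip (PySem.Chars.lstrip cs) := by
  induction cs with
  | nil => simp [PySem.Chars.lstrip, PySem.Chars.rstrip]
  | cons c t ih =>
    by_cases he : List.dropWhile PySem.Chars.isspace t.reverse = []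
    · have hrt : PySem.Chars.rstrip t = [] := by
        simp [PySem.Chars.rstrip, he]
      by_cases hc : PySem.Chars.isspace c = true
      · have h1 : PySem.Chars.rstrip (c :: t) = [] := by
          simp [PySem.Chars.rstrip, List.dropWhile_append, List.dropWhile_cons, he, hc]
        have h2 : PySem.Chars.lstrip (c :: t) = PySem.Chars.lstrip t := by
          simp [PySem.Chars.lstrip, List.dropWhile_cons, hc]
        rw [h1, h2, ← ih, hrt]
      · have h1 : PySem.Chars.rstrip (c :: t) = [c] := by
          simp [PySem.Chars.rstrip, List.dropWhile_append, List.dropWhile_cons, he, hc]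
        have h2 : PySem.Chars.lstrip (c :: t) = c :: t := by
          simp [PySem.Chars.lstrip, List.dropWhile_cons, hc]
        rw [h1, h2, h1]
        simp [PySem.Chars.lstrip, List.dropWhile_cons, hc]
    · have h3 : PySem.Chars.rstrip (c :: t) = c :: PySem.Chars.rstrip t := by
        simp only [PySem.Chars.rstrip, List.reverse_cons, List.dropWhile_append]
        rw [if_neg (by simpa [List.isEmpty_iff] using he)]
        simp [List.reverse_append]
      by_cases hc : PySem.Chars.isspace c = true
      · have h2 : PySem.Chars.lstrip (c :: t) = PySem.Chars.lstrip t := by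
          simp [PySem.Chars.lstrip, List.dropWhile_cons, hc]
        have h4 : PySem.Chars.lstrip (c :: PySem.Chars.rstrip t)
            = PySem.Chars.lstrip (PySem.Chars.rstrip t) := by
          simp [PySem.Chars.lstrip, List.dropWhile_cons, hc]
        rw [h3, h2, h4, ih]
      · have h2 : PySem.Chars.lstrip (c :: t) = c :: t := by
          simp [PySem.Chars.lstrip, List.dropWhile_cons, hc]
        have h4 : PySem.Chars.lstrip (c :: PySem.Chars.rstrip t)
            = c :: PySem.Chars.rstrip t := by
          simp [PySem.Chars.lstrip, List.dropWhile_cons, hc]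
        rw [h3, h4, h2, h3]

theorem pvStripRstripChars (cs : List Char) :
    PySem.Chars.strip (PySem.Chars.rstrip cs) = PySem.Chars.strip cs := by
  simp only [PySem.Chars.strip]
  rw [pvLstripRstripComm, pvRstripRstrip]

theorem pvStripRstrip (l : String) :
    PySem.Str.strip (PySem.Str.rstrip l) = PySem.Str.strip l := by
  apply String.ext
  have h1 : (PySem.Str.strip (PySem.Str.rstrip l)).toList
      = PySem.Chars.strip (PySem.Chars.rstrip l.toList) := by
    simp [PySem.Str.toList_strip, PySem.Str.toList_rstrip]
  have h2 : (PySem.Str.strip l).toList = PySem.Chars.strip l.toList := by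
    simp [PySem.Str.toList_strip]
  have := pvStripRstripChars l.toList
  simpa [String.toList] using h1.trans (this.trans h2.symm)

theorem pvIsHeaderRstrip (l : String) :
    pvIsHeader (PySem.Str.rstrip l) = pvIsHeader l := by
  simp [pvIsHeader, pvStripRstrip]

theorem pvBlankRstrip (l : String) :
    (PySem.Str.strip (PySem.Str.rstrip l) == "") = (PySem.Str.strip l == "") := by
  rw [pvStripRstrip]

theorem pvHeaderNotBlank (l : String) (h : pvIsHeader l = true) :
    (PySem.Str.strip l == "") = false := by
  by_contra hb
  have hb' : PySem.Str.strip l = "" := by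
    cases he : (PySem.Str.strip l == "") with
    | true => exact of_decide_eq_true (by simpa [BEq.beq] using he)
    | false => exact absurd he hb
  rw [pvIsHeader, hb'] at h
  exact absurd h (by decide)

theorem pvRTELEq (ls : List String) :
    pvRTEL ls = (ls.reverse.dropWhile (fun l => PySem.Str.strip l == "")).reverse := by
  induction ls using List.reverseRecOn with
  | nil => rw [pvRTEL]; simp
  | append_singleton ys x ih =>
    rw [pvRTEL]
    have hne : ys ++ [x] ≠ [] := by simp
    simp only [hne, dif_neg, not_false_iff, List.getLast_append, List.dropLast_concat,
      List.reverse_append, List.reverse_cons, List.reverse_nil, List.nil_append,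
      List.cons_append, List.dropWhile_cons]
    by_cases hb : (PySem.Str.strip x == "") = true
    · simp [hb, ih]
    · simp [hb]

theorem pvRTELPrefix (ls : List String) : pvRTEL ls <+: ls := by
  rw [pvRTELEq]
  have h := List.dropWhile_suffix (l := ls.reverse) (p := fun l => PySem.Str.strip l == "")
  have := List.reverse_prefix (l₁ := (ls.reverse.dropWhile (fun l => PySem.Str.strip l == ""))) (l₂ := ls.reverse)
  -- (dropWhile …) <:+ ls.reverse  →  (dropWhile …).reverse <+: ls
  obtain ⟨t, ht⟩ := h
  refine ⟨t.reverse, ?_⟩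
  have : (t ++ (ls.reverse.dropWhile (fun l => PySem.Str.strip l == ""))).reverse = ls := by
    rw [ht]; simp
  simpa [List.reverse_append] using this

theorem pvRTELHead? (ls : List String) :
    pvRTEL ls = [] ∨ (pvRTEL ls).head? = ls.head? := by
  obtain ⟨t, ht⟩ := pvRTELPrefix ls
  cases h : pvRTEL ls with
  | nil => exact Or.inl rfl
  | cons a u =>
    right
    rw [← ht, h]
    simp

theorem pvRTELCons (x : String) (t : List String) (h : (PySem.Str.strip x == "") = false) :
    pvRTEL (x :: t) = x :: pvRTEL t := by
  rw [pvRTELEq, pvRTELEq]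
  simp only [List.reverse_cons, List.dropWhile_append]
  by_cases he : (t.reverse.dropWhile (fun l => PySem.Str.strip l == "")).isEmpty
  · simp [he, List.dropWhile_cons, h, List.isEmpty_iff.mp he]
  · simp [he, List.reverse_append]

theorem pvFlushAAppend (names ms c : List String) :
    pvFlushA names ms c = ms ++ pvFlushA names [] c := by
  unfold pvFlushA
  cases h : pvRTEL c with
  | nil => simp
  | cons a u => by_cases hc : pvCheckA names a <;> simp [hc]

theorem pvMain (L : List String) (names ms c : List String) :
    pvFlushA names (L.foldl (pvStepA names) (ms, c)).1 (L.foldl (pvStepA names) (ms, c)).2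
      = ms ++ pvFlushA names [] (c ++ (L.takeWhile (fun l => !pvIsHeader l)).map PySem.Str.rstrip)
          ++ pvBlocksB names (L.dropWhile (fun l => !pvIsHeader l)) := by
  induction L generalizing ms c with
  | nil => simp [pvFlushAAppend names ms c, pvBlocksB]
  | cons x L' ih =>
    by_cases hx : pvIsHeader x
    · have hstep : pvStepA names (ms, c) x = (pvFlushA names ms c, [PySem.Str.rstrip x]) := by
        simp [pvStepA, hx]
      rw [List.foldl_cons, hstep, ih]
      have hnb : (PySem.Str.strip (PySem.Str.rstrip x) == "") = false := by
        rw [pvBlankRstrip]; exact pvHeaderNotBlank x hx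
      have hbody : pvRTEL ((x :: L'.takeWhile (fun l => !pvIsHeader l)).map PySem.Str.rstrip)
          = PySem.Str.rstrip x :: pvRTEL ((L'.takeWhile (fun l => !pvIsHeader l)).map PySem.Str.rstrip) := by
        rw [List.map_cons, pvRTELCons _ _ hnb]
      have hflush : pvFlushA names []
            (PySem.Str.rstrip x :: (L'.takeWhile (fun l => !pvIsHeader l)).map PySem.Str.rstrip)
          = (if names.any (fun name => PySem.Str.isIn name
                (((pvRTEL ((x :: L'.takeWhile (fun l => !pvIsHeader l)).map PySem.Str.rstrip))).headD "")) then
               [PySem.Str.join "\n" (pvRTEL ((x :: L'.takeWhile (fun l => !pvIsHeader l)).map PySem.Str.rstrip))]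
             else []) := by
        unfold pvFlushA
        rw [show (PySem.Str.rstrip x :: (L'.takeWhile (fun l => !pvIsHeader l)).map PySem.Str.rstrip)
              = ((x :: L'.takeWhile (fun l => !pvIsHeader l)).map PySem.Str.rstrip) by simp, hbody]
        have hchk : pvCheckA names (PySem.Str.rstrip x)
            = names.any (fun name => PySem.Str.isIn name (PySem.Str.rstrip x)) := by
          simp [pvCheckA, pvIsHeaderRstrip, hx]
        simp [hchk]
      have htk : (x :: L').takeWhile (fun l => !pvIsHeader l) = [] := by
        simp [List.takeWhile_cons, hx]
      have hdr : (x :: L').dropWhile (fun l => !pvIsHeader l) = x :: L' := by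
        simp [List.dropWhile_cons, hx]
      rw [pvFlushAAppend names ms c, htk, hdr]
      have hblocks : pvBlocksB names (x :: L')
          = (if names.any (fun name => PySem.Str.isIn name
                ((pvRTEL ((x :: L'.takeWhile (fun l => !pvIsHeader l)).map PySem.Str.rstrip)).headD "")) then
               [PySem.Str.join "\n" (pvRTEL ((x :: L'.takeWhile (fun l => !pvIsHeader l)).map PySem.Str.rstrip))]
             else [])
            ++ pvBlocksB names (L'.dropWhile (fun l => !pvIsHeader l)) := by
        rw [pvBlocksB]
      rw [hblocks, ← hflush]
      simp [List.append_assoc]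
    · have hstep : pvStepA names (ms, c) x = (ms, c ++ [PySem.Str.rstrip x]) := by
        simp [pvStepA, hx]
      rw [List.foldl_cons, hstep, ih]
      have htk : (x :: L').takeWhile (fun l => !pvIsHeader l) = x :: L'.takeWhile (fun l => !pvIsHeader l) := by
        simp [List.takeWhile_cons, hx]
      have hdr : (x :: L').dropWhile (fun l => !pvIsHeader l) = L'.dropWhile (fun l => !pvIsHeader l) := by
        simp [List.dropWhile_cons, hx]
      rw [htk, hdr]
      simp [List.append_assoc]

theorem pvPreambleFlush (L : List String) (names : List String) :
    pvFlushA names [] ((L.takeWhile (fun l => !pvIsHeader l)).map PySem.Str.rstrip) = [] := by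
  unfold pvFlushA
  cases h : pvRTEL ((L.takeWhile (fun l => !pvIsHeader l)).map PySem.Str.rstrip) with
  | nil => rfl
  | cons a u =>
    rcases pvRTELHead? ((L.takeWhile (fun l => !pvIsHeader l)).map PySem.Str.rstrip) with hnil | hh
    · rw [h] at hnil; cases hnil
    · rw [h] at hh
      -- a = rstrip of the head of the takeWhile, which is not a header
      cases hL : (L.takeWhile (fun l => !pvIsHeader l)) with
      | nil => rw [hL] at hh; simp at hh
      | cons y ys =>
        rw [hL] at hh
        simp only [List.map_cons, List.head?_cons, Option.some.injEq] at hh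
        have hy : pvIsHeader y = false := by
          have hmem : y ∈ L.takeWhile (fun l => !pvIsHeader l) := by rw [hL]; simp
          have := List.mem_takeWhile_imp hmem
          simpa using this
        have : pvCheckA names a = false := by
          rw [hh]
          simp [pvCheckA, pvIsHeaderRstrip, hy]
        simp [this]

-- ===== VERDICT (by name: the statement is the Claim_ definition above) =====
theorem indent_python_code_spec : Claim_equal_indent_python_code := by
  intro code scene_ids _
  unfold Spec_indent_python_code indent_python_code indent_python_code_alt pvRemovePython
  simp only []
  rw [pvMain _ _ [] []]
  simp only [List.nil_append]
  rw [pvPreambleFlush]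
  simp
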